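-- pv_equiv track=rewrite | github.com/jamOne-/adventofcode2019 | 24/24a.py | simulate
-- ===== SOURCE A (Python) =====
-- def count_bugs(biodiversity, current, i):
--     count = 0
--     x, y = i % 5, i // 5
--
--     masks = []
--     if y > 0:
--         masks.append(current >> 5)
--     if y < 4:
--         masks.append(current << 5)
--     if x > 0:
--         masks.append(current >> 1)
--     if x < 4:
--         masks.append(current << 1)
--
--     for mask in masks:
--         if biodiversity & mask == mask:
--             count += 1
--
--     return count
--
-- def simulate(biodiversity):
--     seen = set()
--
--     while biodiversity not in seen:
--         seen.add(biodiversity)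
--         new_bio = biodiversity
--
--         current = 1
--         for i in range(25):
--             bugs = count_bugs(biodiversity, current, i)
--
--             if biodiversity & current == current and bugs != 1 or biodiversity & current == 0 and (bugs == 1 or bugs == 2):
--                 new_bio ^= current
--
--             current <<= 1
--
--         biodiversity = new_bio
--
--     return biodiversity
-- ===== SOURCE B (Python) =====
-- def simulate(biodiversity):
--     # Floyd two-pointer cycle detection on the deterministic step map:
--     # no seen-set at all, O(1) extra memory.
--     def step(b):
--         nxt = (b >> 25) << 25  # bits above the 5x5 grid never change
--         for i in range(25):
--             r, c = divmod(i, 5)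
--             bugs = 0
--             if r > 0:
--                 bugs += (b >> (i - 5)) & 1
--             if r < 4:
--                 bugs += (b >> (i + 5)) & 1
--             if c > 0:
--                 bugs += (b >> (i - 1)) & 1
--             if c < 4:
--                 bugs += (b >> (i + 1)) & 1
--             if bugs == 1 or (bugs == 2 and (b >> i) & 1 == 0):
--                 nxt += 1 << i
--         return nxt
--
--     tortoise, hare = step(biodiversity), step(step(biodiversity))
--     while tortoise != hare:
--         tortoise, hare = step(tortoise), step(step(hare))
--     tortoise = biodiversity
--     while tortoise != hare:
--         tortoise, hare = step(tortoise), step(hare)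
--     return tortoise
-- ===== Notes on version B (the rewrite author's own statement) =====
-- stated objective: alternative
-- what changed: B replaces A's seen-set repeat detection by Floyd's two-pointer (tortoise/hare) cycle detection on the deterministic step map -- it stores no visited states at all, meeting in the cycle and then walking a second pass to the cycle entry, whose biodiversity value is exactly the first value A sees twice; B's step also rebuilds each new state from zero with per-bit neighbour tests instead of A's XOR toggling with shifted masks.
import Mathlib
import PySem

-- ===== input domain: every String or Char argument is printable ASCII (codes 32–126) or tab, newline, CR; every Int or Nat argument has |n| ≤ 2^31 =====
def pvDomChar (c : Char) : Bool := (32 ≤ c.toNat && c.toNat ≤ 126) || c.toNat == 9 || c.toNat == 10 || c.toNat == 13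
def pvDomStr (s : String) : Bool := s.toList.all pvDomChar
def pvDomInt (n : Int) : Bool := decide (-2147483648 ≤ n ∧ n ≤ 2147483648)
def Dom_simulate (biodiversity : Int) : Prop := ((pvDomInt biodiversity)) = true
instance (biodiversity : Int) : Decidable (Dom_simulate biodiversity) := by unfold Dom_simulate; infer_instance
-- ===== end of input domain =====

-- B replaces A's seen-set repeat detection by Floyd's two-pointer cycle
-- detection on the deterministic step map (no visited-state set; the second
-- pass returns the cycle-entry state, which is exactly the first value A sees
-- twice), and its step rebuilds each state from zero with per-bit neighbour
-- tests instead of A's XOR toggling; objective: alternative algorithm.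

-- ===== PORT A =====
def countBugs (biodiversity current i : Int) : Int :=
  let x := PySem.Int.mod i 5
  let y := PySem.Int.floordiv i 5
  let masks : List Int := []
  let masks := if y > 0 then masks ++ [current >>> (5 : Int)] else masks
  let masks := if y < 4 then masks ++ [current <<< (5 : Int)] else masks
  let masks := if x > 0 then masks ++ [current >>> (1 : Int)] else masks
  let masks := if x < 4 then masks ++ [current <<< (1 : Int)] else masks
  masks.foldl (fun count mask =>
    if PySem.Int.band biodiversity mask = mask then count + 1 else count) 0

-- the body of A's while-loop: one pass of `for i in range(25)` over (new_bio, current)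
def simStep (biodiversity : Int) : Int :=
  ((PySem.List.pyRange 0 25 1).foldl
    (fun (st : Int × Int) i =>
      let new_bio := st.1
      let current := st.2
      let bugs := countBugs biodiversity current i
      let new_bio :=
        if (PySem.Int.band biodiversity current = current ∧ bugs ≠ 1) ∨
           (PySem.Int.band biodiversity current = 0 ∧ (bugs = 1 ∨ bugs = 2)) then
          PySem.Int.bxor new_bio current
        else new_bio
      (new_bio, current <<< (1 : Int)))
    (biodiversity, 1)).1

-- A's `while biodiversity not in seen`; the fuel only makes the loop total (the
-- state revisits one of at most 2^25 + 1 values, so the fuel is never exhausted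
-- before the repeat)
def simLoop : Nat → PySem.Set Int → Int → Int
  | 0, _, biodiversity => biodiversity
  | fuel + 1, seen, biodiversity =>
    if biodiversity ∈ seen then biodiversity
    else simLoop fuel (PySem.Set.add seen biodiversity) (simStep biodiversity)

def simulate (biodiversity : Int) : Int :=
  simLoop 33554434 PySem.Set.empty biodiversity

-- ===== PORT B =====
-- B's step: rebuild the next state from the preserved high bits, setting each
-- grid bit from its neighbour count
def altStep (b : Int) : Int :=
  (PySem.List.pyRange 0 25 1).foldl (fun nxt i =>
    let r := PySem.Int.floordiv i 5
    let c := PySem.Int.mod i 5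
    let bugs : Int := 0
    let bugs := if r > 0 then bugs + PySem.Int.band (b >>> (i - 5)) 1 else bugs
    let bugs := if r < 4 then bugs + PySem.Int.band (b >>> (i + 5)) 1 else bugs
    let bugs := if c > 0 then bugs + PySem.Int.band (b >>> (i - 1)) 1 else bugs
    let bugs := if c < 4 then bugs + PySem.Int.band (b >>> (i + 1)) 1 else bugs
    if bugs = 1 ∨ (bugs = 2 ∧ PySem.Int.band (b >>> i) 1 = 0) then
      nxt + ((1 : Int) <<< i)
    else nxt)
    ((b >>> (25 : Int)) <<< (25 : Int))

-- B's first while loop (tortoise one step, hare two); fuel only for totality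
def floyd1 : Nat → Int → Int → Int
  | 0, t, _ => t
  | fuel + 1, t, h => if t = h then t else floyd1 fuel (altStep t) (altStep (altStep h))

-- B's second while loop (both one step); fuel only for totality
def floyd2 : Nat → Int → Int → Int
  | 0, t, _ => t
  | fuel + 1, t, h => if t = h then t else floyd2 fuel (altStep t) (altStep h)

def simulate_alt (biodiversity : Int) : Int :=
  floyd2 33554434 biodiversity
    (floyd1 33554434 (altStep biodiversity) (altStep (altStep biodiversity)))

-- ===== PRECONDITION & SPEC =====
def Spec_simulate (biodiversity : Int) (out : Int) : Prop := out = simulate_alt biodiversity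
instance (biodiversity : Int) (out : Int) : Decidable (Spec_simulate biodiversity out) := by unfold Spec_simulate; infer_instance

-- ===== CLAIM (what is proved, stated in full; the proofs are below) =====
def Claim_equal_simulate : Prop := ∀ (biodiversity : Int), Dom_simulate biodiversity → Spec_simulate biodiversity (simulate biodiversity)

-- ===== LEMMAS AND PROOFS =====

def pvL (β : Nat → Bool) (k : Nat) : Int :=
  ∑ i ∈ Finset.range k, (if β i then (2 : Int) ^ i else 0)
def pvU (β : Nat → Bool) (k : Nat) : Int :=
  ∑ i ∈ Finset.range (25 - k), (if β (k + i) then (2 : Int) ^ i else 0)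

theorem pvL_succ (β : Nat → Bool) (k : Nat) :
    pvL β (k + 1) = pvL β k + (if β k then (2 : Int) ^ k else 0) := by
  simp [pvL, Finset.sum_range_succ]

theorem pvL_bounds (β : Nat → Bool) (k : Nat) : 0 ≤ pvL β k ∧ pvL β k < 2 ^ k := by
  induction k with
  | zero => simp [pvL]
  | succ k ih =>
    rw [pvL_succ]
    have h2 : (2 : Int) ^ (k + 1) = 2 ^ k * 2 := by ring
    rcases ih with ⟨h0, h1⟩
    by_cases h : β k <;> simp [h] <;> omega

theorem pvU_rec (β : Nat → Bool) (k : Nat) (hk : k < 25) :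
    pvU β k = (if β k then 1 else 0) + 2 * pvU β (k + 1) := by
  have h : 25 - k = (25 - (k+1)) + 1 := by omega
  rw [pvU, h, Finset.sum_range_succ']
  rw [pvU, Finset.mul_sum]
  rw [Finset.sum_congr rfl (fun i _ => show (if β (k + (i+1)) then (2:Int)^(i+1) else 0)
        = 2 * (if β (k + 1 + i) then (2:Int)^i else 0) by
      have : k + (i + 1) = k + 1 + i := by omega
      rw [this]; by_cases hb : β (k+1+i) <;> simp [hb] <;> ring)]
  simp [add_comm]

theorem pvSplit (β : Nat → Bool) (k : Nat) (hk : k ≤ 25) :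
    pvL β 25 = pvL β k + 2 ^ k * pvU β k := by
  rw [pvL, pvU, Finset.mul_sum]
  have h25 : 25 = k + (25 - k) := by omega
  rw [show (Finset.range 25) = Finset.range (k + (25 - k)) by rw [← h25]]
  rw [Finset.sum_range_add]
  congr 1
  exact Finset.sum_congr rfl (fun i _ => by
    by_cases hb : β (k + i) <;> simp [hb, pow_add])

theorem pvDivBit (k : Nat) (Q r : Int) (h0 : 0 ≤ r) (h1 : r < 2 ^ k) :
    (r + 2 ^ k * Q) / 2 ^ k % 2 = Q % 2 := by
  rw [mul_comm, Int.add_mul_ediv_right _ _ (by positivity : (2:Int)^k ≠ 0),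
    Int.ediv_eq_zero_of_lt h0 h1, zero_add]

theorem pvQmod (m : Int) (β : Nat → Bool) (k : Nat) (hk : k < 25) :
    (m * 2 ^ (25 - k) + pvU β k) % 2 = (if β k then 1 else 0) := by
  have hrec := pvU_rec β k hk
  have h2 : (2:Int) ^ (25 - k) = 2 * 2 ^ (24 - k) := by
    rw [show 25 - k = (24 - k) + 1 by omega]; ring
  rw [hrec, h2]
  have key : m * (2 * 2 ^ (24 - k)) + ((if β k then (1:Int) else 0) + 2 * pvU β (k+1))
      = 2 * (m * 2 ^ (24 - k) + pvU β (k+1)) + (if β k then 1 else 0) := by ring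
  rw [key]
  by_cases hβ : β k <;> simp [hβ] <;> omega

theorem pvBit (m : Int) (β : Nat → Bool) (k : Nat) (hk : k < 25) :
    (m * 2 ^ 25 + pvL β 25) / 2 ^ k % 2 = (if β k then 1 else 0) := by
  have hsplit := pvSplit β k (by omega)
  have hb := pvL_bounds β k
  have hm : m * 2 ^ 25 + pvL β 25
      = pvL β k + 2 ^ k * (m * 2 ^ (25 - k) + pvU β k) := by
    rw [hsplit, show (2:Int)^25 = 2^k * 2^(25-k) by rw [← pow_add]; congr 1; omega]
    ring
  rw [hm, pvDivBit k _ _ hb.1 hb.2, pvQmod m β k hk]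

theorem pvNatXor (k n : Nat) :
    n ^^^ 2 ^ k = if n.testBit k then n - 2 ^ k else n + 2 ^ k := by
  induction k generalizing n with
  | zero =>
    have hd : (n ^^^ 1) / 2 = n / 2 := by
      simpa using (Nat.xor_div_two (a := n) (b := 1))
    have hm : (n ^^^ 1) % 2 = (n + 1) % 2 := Nat.xor_mod_two_eq
    have ht : n.testBit 0 = decide (n % 2 = 1) := Nat.testBit_zero n
    have e1 : n ^^^ 1 = 2 * ((n ^^^ 1) / 2) + (n ^^^ 1) % 2 := by omega
    have e2 : n = 2 * (n / 2) + n % 2 := by omega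
    by_cases h : n % 2 = 1 <;> simp [ht, h] <;> omega
  | succ k ih =>
    have h2 : 2 ^ (k + 1) = 2 * 2 ^ k := by ring
    have hd : (n ^^^ 2 ^ (k + 1)) / 2 = n / 2 ^^^ 2 ^ k := by
      rw [Nat.xor_div_two, h2, Nat.mul_div_cancel_left _ (by omega)]
    have hm : (n ^^^ 2 ^ (k + 1)) % 2 = n % 2 := by
      rw [Nat.xor_mod_two_eq, h2]; omega
    have ht : n.testBit (k + 1) = (n / 2).testBit k := by
      simpa [Nat.shiftRight_one] using Nat.testBit_succ n k
    have e1 : n ^^^ 2 ^ (k+1) = 2 * ((n ^^^ 2 ^ (k+1)) / 2) + (n ^^^ 2 ^ (k+1)) % 2 := by omega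
    have e2 : n = 2 * (n / 2) + n % 2 := by omega
    rw [ht]
    by_cases h : (n / 2).testBit k
    · have hge : 2 ^ k ≤ n / 2 := Nat.ge_two_pow_of_testBit h
      have := ih (n / 2)
      simp [h] at this ⊢
      omega
    · have := ih (n / 2)
      simp [h] at this ⊢
      omega

theorem pvShr (a : Int) (k : Nat) : a >>> ((k : Nat) : Int) = a / 2 ^ k := by
  rw [Int.shiftRight_natCast_right, Int.shiftRight_eq_div_pow]; norm_cast

theorem pvShl (a : Int) (k : Nat) : a <<< ((k : Nat) : Int) = a * 2 ^ k := by
  rw [Int.shiftLeft_eq_mul_pow]; norm_cast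

theorem pvNegDiv (m : Nat) (k : Nat) :
    (-(m : Int) - 1) / 2 ^ k = -((m / 2 ^ k : Nat) : Int) - 1 := by
  have hd := Nat.div_add_mod m (2 ^ k)
  have hlt : m % 2 ^ k < 2 ^ k := Nat.mod_lt _ (by positivity)
  have he : -(m : Int) - 1
      = ((2 ^ k - 1 - (m % 2 ^ k : Nat)) + (-((m / 2 ^ k : Nat)) - 1) * 2 ^ k) := by
    push_cast
    nlinarith [hd, hlt]
  rw [he, Int.add_mul_ediv_right _ _ (by positivity : (2:Int)^k ≠ 0),
    Int.ediv_eq_zero_of_lt (by push_cast; omega) (by push_cast; omega), zero_add]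

theorem pvCast (n : Nat) (k : Nat) :
    ((n : Int)) / 2 ^ k % 2 = ((n / 2 ^ k % 2 : Nat) : Int) := by
  push_cast; rfl

theorem pvNegCond (a : Int) (n : Nat) (k : Nat) (hneg : a = -(n : Int) - 1) :
    (a / 2 ^ k % 2 = 1) ↔ ¬ (n.testBit k = true) := by
  subst hneg
  rw [pvNegDiv, Nat.testBit_eq_decide_div_mod_eq]
  have h2 : ((n / 2 ^ k : Nat) : Int) % 2 = ((n / 2 ^ k % 2 : Nat) : Int) := by
    push_cast; rfl
  constructor
  · intro h hc
    simp only [decide_eq_true_eq] at hc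
    omega
  · intro h
    simp only [decide_eq_true_eq] at h
    omega

theorem pvXorPow (a : Int) (k : Nat) :
    PySem.Int.bxor a (2 ^ k) = if a / 2 ^ k % 2 = 1 then a - 2 ^ k else a + 2 ^ k := by
  have hp : ((2 : Int) ^ k).toNat = 2 ^ k := by
    rw [show ((2:Int) ^ k) = ((2 ^ k : Nat) : Int) by push_cast; ring, Int.toNat_natCast]
  by_cases ha : 0 ≤ a
  · obtain ⟨n, rfl⟩ : ∃ n : Nat, a = (n : Int) := ⟨a.toNat, (Int.toNat_of_nonneg ha).symm⟩
    rw [PySem.Int.bxor, if_pos ha, if_pos (by positivity), hp, Int.toNat_natCast, pvNatXor]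
    have hc : (((n : Int)) / 2 ^ k % 2 = 1) ↔ (n / 2 ^ k % 2 = 1) := by
      rw [pvCast]; omega
    by_cases h : n.testBit k
    · have hge : 2 ^ k ≤ n := Nat.ge_two_pow_of_testBit h
      rw [if_pos h, if_pos (by rw [hc]; simpa [Nat.testBit_eq_decide_div_mod_eq] using h)]
      push_cast [hge]; ring
    · rw [if_neg h, if_neg (by rw [hc]; simpa [Nat.testBit_eq_decide_div_mod_eq] using h)]
      push_cast; ring
  · set n := (-a - 1).toNat with hn
    have hneg : a = -(n : Int) - 1 := by
      have : ((-a - 1).toNat : Int) = -a - 1 := Int.toNat_of_nonneg (by omega)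
      omega
    rw [PySem.Int.bxor, if_neg ha, if_pos (by positivity), hp, ← hn, pvNatXor]
    by_cases h : n.testBit k
    · have hge : 2 ^ k ≤ n := Nat.ge_two_pow_of_testBit h
      rw [if_pos h, if_neg (by rw [pvNegCond a n k hneg]; simp [h])]
      push_cast [hge]; omega
    · rw [if_neg h, if_pos (by rw [pvNegCond a n k hneg]; simp [h])]
      push_cast; omega

theorem pvBandPow (a : Int) (k : Nat) :
    PySem.Int.band a (2 ^ k) = if a / 2 ^ k % 2 = 1 then (2 : Int) ^ k else 0 := by
  have hp : ((2 : Int) ^ k).toNat = 2 ^ k := by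
    rw [show ((2:Int) ^ k) = ((2 ^ k : Nat) : Int) by push_cast; ring, Int.toNat_natCast]
  by_cases ha : 0 ≤ a
  · obtain ⟨n, rfl⟩ : ∃ n : Nat, a = (n : Int) := ⟨a.toNat, (Int.toNat_of_nonneg ha).symm⟩
    rw [PySem.Int.band, if_pos ha, if_pos (by positivity), hp, Int.toNat_natCast,
      Nat.and_two_pow]
    have hc : (((n : Int)) / 2 ^ k % 2 = 1) ↔ (n / 2 ^ k % 2 = 1) := by
      rw [pvCast]; omega
    by_cases h : n.testBit k
    · rw [if_pos (by rw [hc]; simpa [Nat.testBit_eq_decide_div_mod_eq] using h)]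
      simp [h]
    · rw [if_neg (by rw [hc]; simpa [Nat.testBit_eq_decide_div_mod_eq] using h)]
      simp [h]
  · set n := (-a - 1).toNat with hn
    have hneg : a = -(n : Int) - 1 := by
      have : ((-a - 1).toNat : Int) = -a - 1 := Int.toNat_of_nonneg (by omega)
      omega
    rw [PySem.Int.band, if_neg ha, if_pos (by positivity), hp, ← hn, Nat.two_pow_and]
    by_cases h : n.testBit k
    · rw [if_neg (by rw [pvNegCond a n k hneg]; simp [h])]
      simp [h]
    · rw [if_pos (by rw [pvNegCond a n k hneg]; simp [h])]
      simp [h]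

def pvBug (β : Nat → Bool) (k : Nat) : Int :=
  ((((0 : Int)
    + (if 5 ≤ k then (if β (k - 5) then 1 else 0) else 0))
    + (if k < 20 then (if β (k + 5) then 1 else 0) else 0))
    + (if 0 < k % 5 then (if β (k - 1) then 1 else 0) else 0))
    + (if k % 5 < 4 then (if β (k + 1) then 1 else 0) else 0)

theorem pvBandBit (m : Int) (β : Nat → Bool) (k : Nat) (hk : k < 25) :
    PySem.Int.band (m * 2 ^ 25 + pvL β 25) (2 ^ k) = (if β k then (2 : Int) ^ k else 0) := by
  rw [pvBandPow, pvBit m β k hk]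
  by_cases h : β k <;> simp [h]

theorem pvShrPow (k : Nat) (j : Nat) (h : j ≤ k) : ((2:Int) ^ k) >>> ((j:Nat) : Int) = 2 ^ (k - j) := by
  rw [pvShr, show (2:Int)^k = 2^(k-j) * 2^j by rw [← pow_add]; congr 1; omega]
  exact Int.mul_ediv_cancel _ (by positivity)

theorem pvShlPow (k : Nat) (j : Nat) : ((2:Int) ^ k) <<< ((j:Nat) : Int) = 2 ^ (k + j) := by
  rw [pvShl, ← pow_add]

theorem pvFoldPiece (bio a : Int) (c : Prop) [Decidable c] (x : Int) :
    List.foldl (fun count mask => if PySem.Int.band bio mask = mask then count + 1 else count)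
      a (if c then [x] else [])
    = a + (if c then (if PySem.Int.band bio x = x then (1:Int) else 0) else 0) := by
  by_cases h : c
  · simp only [if_pos h, List.foldl]
    split <;> simp
  · simp [h]

theorem pvIteApp {α : Type} (c : Prop) [Decidable c] (m : List α) (x : α) :
    (if c then m ++ [x] else m) = m ++ (if c then [x] else []) := by
  split <;> simp

theorem pvCountBugs (m : Int) (β : Nat → Bool) (k : Nat) (hk : k < 25) :
    countBugs (m * 2 ^ 25 + pvL β 25) (2 ^ k) (k : Int) = pvBug β k := by
  have hx : PySem.Int.mod (k : Int) 5 = ((k % 5 : Nat) : Int) := by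
    exact_mod_cast PySem.Int.mod_natCast k 5
  have hy : PySem.Int.floordiv (k : Int) 5 = ((k / 5 : Nat) : Int) := by
    exact_mod_cast PySem.Int.floordiv_natCast k 5
  unfold countBugs
  rw [hx, hy]
  simp only [pvIteApp, List.nil_append]
  rw [List.foldl_append, List.foldl_append, List.foldl_append]
  rw [pvFoldPiece, pvFoldPiece, pvFoldPiece, pvFoldPiece]
  have e1 : (if ((k / 5 : Nat) : Int) > 0 then
      (if PySem.Int.band (m * 2 ^ 25 + pvL β 25) ((2:Int)^k >>> (5:Int)) = (2:Int)^k >>> (5:Int)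
        then (1:Int) else 0) else 0)
      = (if 5 ≤ k then (if β (k - 5) then (1:Int) else 0) else 0) := by
    by_cases h : 5 ≤ k
    · rw [if_pos (by exact_mod_cast by omega : ((k / 5 : Nat) : Int) > 0), if_pos h]
      rw [show (5:Int) = ((5:Nat):Int) by norm_num, pvShrPow k 5 h,
        pvBandBit m β (k-5) (by omega)]
      by_cases hb : β (k-5) <;> simp [hb]
      positivity
    · rw [if_neg (by exact_mod_cast by omega : ¬ ((k / 5 : Nat) : Int) > 0), if_neg h]
  have e2 : (if ((k / 5 : Nat) : Int) < 4 then
      (if PySem.Int.band (m * 2 ^ 25 + pvL β 25) ((2:Int)^k <<< (5:Int)) = (2:Int)^k <<< (5:Int)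
        then (1:Int) else 0) else 0)
      = (if k < 20 then (if β (k + 5) then (1:Int) else 0) else 0) := by
    by_cases h : k < 20
    · rw [if_pos (by exact_mod_cast by omega : ((k / 5 : Nat) : Int) < 4), if_pos h]
      rw [show (5:Int) = ((5:Nat):Int) by norm_num, pvShlPow k 5,
        pvBandBit m β (k+5) (by omega)]
      by_cases hb : β (k+5) <;> simp [hb]
      positivity
    · rw [if_neg (by exact_mod_cast by omega : ¬ ((k / 5 : Nat) : Int) < 4), if_neg h]
  have e3 : (if ((k % 5 : Nat) : Int) > 0 then
      (if PySem.Int.band (m * 2 ^ 25 + pvL β 25) ((2:Int)^k >>> (1:Int)) = (2:Int)^k >>> (1:Int)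
        then (1:Int) else 0) else 0)
      = (if 0 < k % 5 then (if β (k - 1) then (1:Int) else 0) else 0) := by
    by_cases h : 0 < k % 5
    · rw [if_pos (by exact_mod_cast by omega : ((k % 5 : Nat) : Int) > 0), if_pos h]
      rw [show (1:Int) = ((1:Nat):Int) by norm_num, pvShrPow k 1 (by omega),
        pvBandBit m β (k-1) (by omega)]
      by_cases hb : β (k-1) <;> simp [hb]
      positivity
    · rw [if_neg (by exact_mod_cast by omega : ¬ ((k % 5 : Nat) : Int) > 0), if_neg h]
  have e4 : (if ((k % 5 : Nat) : Int) < 4 then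
      (if PySem.Int.band (m * 2 ^ 25 + pvL β 25) ((2:Int)^k <<< (1:Int)) = (2:Int)^k <<< (1:Int)
        then (1:Int) else 0) else 0)
      = (if k % 5 < 4 then (if β (k + 1) then (1:Int) else 0) else 0) := by
    by_cases h : k % 5 < 4
    · rw [if_pos (by exact_mod_cast by omega : ((k % 5 : Nat) : Int) < 4), if_pos h]
      rw [show (1:Int) = ((1:Nat):Int) by norm_num, pvShlPow k 1,
        pvBandBit m β (k+1) (by omega)]
      by_cases hb : β (k+1) <;> simp [hb]
      positivity
    · rw [if_neg (by exact_mod_cast by omega : ¬ ((k % 5 : Nat) : Int) < 4), if_neg h]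
  rw [e1, e2, e3, e4]
  rfl

def pvNew (β : Nat → Bool) (k : Nat) : Bool :=
  if β k then pvBug β k == 1 else (pvBug β k == 1 || pvBug β k == 2)

theorem pvAInv (m : Int) (β : Nat → Bool) (k : Nat) (hk : k ≤ 25) :
    ((List.range k).map (fun (n : Nat) => (n : Int))).foldl
      (fun (st : Int × Int) i =>
        let new_bio := st.1
        let current := st.2
        let bugs := countBugs (m * 2 ^ 25 + pvL β 25) current i
        let new_bio :=
          if (PySem.Int.band (m * 2 ^ 25 + pvL β 25) current = current ∧ bugs ≠ 1) ∨
             (PySem.Int.band (m * 2 ^ 25 + pvL β 25) current = 0 ∧ (bugs = 1 ∨ bugs = 2)) then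
            PySem.Int.bxor new_bio current
          else new_bio
        (new_bio, current <<< (1 : Int)))
      (m * 2 ^ 25 + pvL β 25, 1)
    = (m * 2 ^ 25 + pvL (pvNew β) k + 2 ^ k * pvU β k, 2 ^ k) := by
  induction k with
  | zero =>
    simp [pvL, pvU]
  | succ k ih =>
    have hk25 : k < 25 := by omega
    have hne : ((2:Int) ^ k) ≠ 0 := by positivity
    rw [List.range_succ, List.map_append, List.foldl_append, ih (by omega)]
    simp only [List.map, List.foldl]
    rw [pvCountBugs m β k hk25, pvBandBit m β k hk25]
    have hshl : ((2:Int) ^ k) <<< (1 : Int) = 2 ^ (k + 1) := by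
      rw [show (1:Int) = ((1:Nat):Int) by norm_num, pvShlPow]
    have hdiv : (m * 2 ^ 25 + pvL (pvNew β) k + 2 ^ k * pvU β k) / 2 ^ k % 2
        = (if β k then 1 else 0) := by
      have hb := pvL_bounds (pvNew β) k
      rw [show m * 2 ^ 25 + pvL (pvNew β) k + 2 ^ k * pvU β k
          = pvL (pvNew β) k + 2 ^ k * (m * 2 ^ (25 - k) + pvU β k) by
        rw [show (2:Int)^25 = 2^k * 2^(25-k) by rw [← pow_add]; congr 1; omega]; ring]
      rw [pvDivBit k _ _ hb.1 hb.2, pvQmod m β k hk25]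
    have hLs := pvL_succ (pvNew β) k
    have hUr := pvU_rec β k hk25
    by_cases hβ : β k
    · simp only [hβ, eq_self_iff_true, if_true, hne, false_and, or_false, and_true, true_and]
      by_cases hbug : pvBug β k = 1
      · simp only [hbug, ne_eq, not_true_eq_false, if_false]
        refine Prod.ext ?_ hshl
        simp only []
        rw [hLs]
        have : pvNew β k = true := by simp [pvNew, hβ, hbug]
        rw [this, if_pos rfl, hUr, hβ, if_pos rfl]
        ring
      · rw [if_pos hbug]
        rw [pvXorPow, if_pos (by rw [hdiv]; simp [hβ])]
        refine Prod.ext ?_ hshl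
        simp only []
        rw [hLs]
        have : pvNew β k = false := by simp [pvNew, hβ, hbug]
        rw [this, if_neg Bool.false_ne_true, hUr, hβ, if_pos rfl]
        ring
    · have hβ' : β k = false := by simpa using hβ
      have h0ne : (0:Int) ≠ 2 ^ k := fun h => hne h.symm
      simp only [hβ', Bool.false_eq_true, if_false, h0ne, false_and, false_or, true_and]
      by_cases hbug : pvBug β k = 1 ∨ pvBug β k = 2
      · rw [if_pos hbug]
        rw [pvXorPow, if_neg (by rw [hdiv]; simp [hβ])]
        refine Prod.ext ?_ hshl
        simp only []
        rw [hLs]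
        have : pvNew β k = true := by
          simp [pvNew, hβ]
          rcases hbug with h | h <;> simp [h]
        rw [this, if_pos rfl, hUr, hβ', if_neg Bool.false_ne_true]
        ring
      · rw [if_neg hbug]
        refine Prod.ext ?_ hshl
        simp only []
        rw [hLs]
        have : pvNew β k = false := by
          simp [pvNew, hβ]
          push_neg at hbug
          exact ⟨hbug.1, hbug.2⟩
        rw [this, if_neg Bool.false_ne_true, hUr, hβ', if_neg Bool.false_ne_true]
        ring

theorem pvStepA (m : Int) (β : Nat → Bool) :
    simStep (m * 2 ^ 25 + pvL β 25) = m * 2 ^ 25 + pvL (pvNew β) 25 := by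
  unfold simStep
  rw [show (25:Int) = ((25:Nat):Int) by norm_num, PySem.List.pyRange_zero_natCast,
    pvAInv m β 25 (by omega)]
  simp [pvU]

theorem pvDecomp (bio : Int) (k : Nat) :
    pvL (fun j => decide (bio / 2 ^ j % 2 = 1)) k = bio - bio / 2 ^ k * 2 ^ k := by
  induction k with
  | zero => simp [pvL]
  | succ k ih =>
    rw [pvL_succ, ih]
    have hdd : bio / 2 ^ k / 2 = bio / 2 ^ (k + 1) := by
      rw [Int.ediv_ediv_of_nonneg (by positivity), ← pow_succ]
    have hq := Int.mul_ediv_add_emod (bio / 2 ^ k) 2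
    have hmod : bio / 2 ^ k % 2 = bio / 2 ^ k - 2 * (bio / 2 ^ (k + 1)) := by omega
    have h2 : bio / 2 ^ k % 2 = 0 ∨ bio / 2 ^ k % 2 = 1 := Int.emod_two_eq_zero_or_one _
    by_cases hb : bio / 2 ^ k % 2 = 1
    · rw [if_pos (by simpa using hb)]
      have : bio / 2 ^ k = 2 * (bio / 2 ^ (k + 1)) + 1 := by omega
      rw [this]; ring
    · rw [if_neg (by simpa using hb)]
      have : bio / 2 ^ k = 2 * (bio / 2 ^ (k + 1)) := by omega
      rw [this]; ring

-- ---- B's step equals A's step ----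

theorem pvBandOneBit (m : Int) (β : Nat → Bool) (j : Nat) (hj : j < 25) :
    PySem.Int.band ((m * 2 ^ 25 + pvL β 25) >>> ((j : Nat) : Int)) 1
      = (if β j then 1 else 0) := by
  rw [pvShr, PySem.Int.band_one, PySem.Int.mod_eq_emod_of_pos (by norm_num), pvBit m β j hj]

theorem pvHigh (m : Int) (β : Nat → Bool) :
    ((m * 2 ^ 25 + pvL β 25) >>> (25 : Int)) <<< (25 : Int) = m * 2 ^ 25 := by
  have hb := pvL_bounds β 25
  rw [show (25:Int) = ((25:Nat):Int) by norm_num, pvShr, pvShl, add_comm,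
    Int.add_mul_ediv_right _ _ (by positivity : (2:Int)^25 ≠ 0),
    Int.ediv_eq_zero_of_lt hb.1 hb.2]
  ring

theorem pvAltInv (m : Int) (β : Nat → Bool) (k : Nat) (hk : k ≤ 25) :
    ((List.range k).map (fun (n : Nat) => (n : Int))).foldl
      (fun nxt i =>
        let r := PySem.Int.floordiv i 5
        let c := PySem.Int.mod i 5
        let bugs : Int := 0
        let bugs := if r > 0 then bugs + PySem.Int.band ((m * 2 ^ 25 + pvL β 25) >>> (i - 5)) 1 else bugs
        let bugs := if r < 4 then bugs + PySem.Int.band ((m * 2 ^ 25 + pvL β 25) >>> (i + 5)) 1 else bugs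
        let bugs := if c > 0 then bugs + PySem.Int.band ((m * 2 ^ 25 + pvL β 25) >>> (i - 1)) 1 else bugs
        let bugs := if c < 4 then bugs + PySem.Int.band ((m * 2 ^ 25 + pvL β 25) >>> (i + 1)) 1 else bugs
        if bugs = 1 ∨ (bugs = 2 ∧ PySem.Int.band ((m * 2 ^ 25 + pvL β 25) >>> i) 1 = 0) then
          nxt + ((1 : Int) <<< i)
        else nxt)
      (m * 2 ^ 25)
    = m * 2 ^ 25 + pvL (pvNew β) k := by
  induction k with
  | zero => simp [pvL]
  | succ k ih =>
    have hk25 : k < 25 := by omega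
    rw [List.range_succ, List.map_append, List.foldl_append, ih (by omega)]
    simp only [List.map, List.foldl]
    have hr : PySem.Int.floordiv (k : Int) 5 = ((k / 5 : Nat) : Int) := by
      exact_mod_cast PySem.Int.floordiv_natCast k 5
    have hc : PySem.Int.mod (k : Int) 5 = ((k % 5 : Nat) : Int) := by
      exact_mod_cast PySem.Int.mod_natCast k 5
    rw [hr, hc]
    have e1 : (if ((k / 5 : Nat) : Int) > 0 then
        (0:Int) + PySem.Int.band ((m * 2 ^ 25 + pvL β 25) >>> ((k:Int) - 5)) 1 else 0)
        = (if 5 ≤ k then (if β (k - 5) then (1:Int) else 0) else 0) := by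
      by_cases h : 5 ≤ k
      · rw [if_pos (by exact_mod_cast by omega : ((k / 5 : Nat) : Int) > 0), if_pos h,
          show (k:Int) - 5 = (((k - 5 : Nat)) : Int) by push_cast [h]; ring,
          pvBandOneBit m β (k-5) (by omega)]
        ring
      · rw [if_neg (by exact_mod_cast by omega : ¬ ((k / 5 : Nat) : Int) > 0), if_neg h]
    have e2 : ∀ a : Int, (if ((k / 5 : Nat) : Int) < 4 then
        a + PySem.Int.band ((m * 2 ^ 25 + pvL β 25) >>> ((k:Int) + 5)) 1 else a)
        = a + (if k < 20 then (if β (k + 5) then (1:Int) else 0) else 0) := by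
      intro a
      by_cases h : k < 20
      · rw [if_pos (by exact_mod_cast by omega : ((k / 5 : Nat) : Int) < 4), if_pos h,
          show (k:Int) + 5 = (((k + 5 : Nat)) : Int) by push_cast; ring,
          pvBandOneBit m β (k+5) (by omega)]
      · rw [if_neg (by exact_mod_cast by omega : ¬ ((k / 5 : Nat) : Int) < 4), if_neg h]
        ring
    have e3 : ∀ a : Int, (if ((k % 5 : Nat) : Int) > 0 then
        a + PySem.Int.band ((m * 2 ^ 25 + pvL β 25) >>> ((k:Int) - 1)) 1 else a)
        = a + (if 0 < k % 5 then (if β (k - 1) then (1:Int) else 0) else 0) := by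
      intro a
      by_cases h : 0 < k % 5
      · have hk1 : 1 ≤ k := by omega
        rw [if_pos (by exact_mod_cast by omega : ((k % 5 : Nat) : Int) > 0), if_pos h,
          show (k:Int) - 1 = (((k - 1 : Nat)) : Int) by push_cast [hk1]; ring,
          pvBandOneBit m β (k-1) (by omega)]
      · rw [if_neg (by exact_mod_cast by omega : ¬ ((k % 5 : Nat) : Int) > 0), if_neg h]
        ring
    have e4 : ∀ a : Int, (if ((k % 5 : Nat) : Int) < 4 then
        a + PySem.Int.band ((m * 2 ^ 25 + pvL β 25) >>> ((k:Int) + 1)) 1 else a)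
        = a + (if k % 5 < 4 then (if β (k + 1) then (1:Int) else 0) else 0) := by
      intro a
      by_cases h : k % 5 < 4
      · rw [if_pos (by exact_mod_cast by omega : ((k % 5 : Nat) : Int) < 4), if_pos h,
          show (k:Int) + 1 = (((k + 1 : Nat)) : Int) by push_cast; ring,
          pvBandOneBit m β (k+1) (by omega)]
      · rw [if_neg (by exact_mod_cast by omega : ¬ ((k % 5 : Nat) : Int) < 4), if_neg h]
        ring
    rw [show ((0:Int) + _) = _ from rfl]
    rw [e1, e2, e3, e4]
    rw [pvBandOneBit m β k hk25]
    have hbugs : (if 5 ≤ k then (if β (k - 5) then (1:Int) else 0) else 0)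
        + (if k < 20 then (if β (k + 5) then (1:Int) else 0) else 0)
        + (if 0 < k % 5 then (if β (k - 1) then (1:Int) else 0) else 0)
        + (if k % 5 < 4 then (if β (k + 1) then (1:Int) else 0) else 0) = pvBug β k := by
      simp [pvBug]
    rw [hbugs]
    have hshl : ((1:Int)) <<< ((k:Int)) = 2 ^ k := by
      have := pvShl 1 k
      simpa using this
    have hcond : (pvBug β k = 1 ∨ (pvBug β k = 2 ∧ (if β k then (1:Int) else 0) = 0))
        ↔ (pvNew β k = true) := by
      by_cases hβ : β k <;> simp [pvNew, hβ] <;> constructor <;> intro h <;> omega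
    rw [pvL_succ]
    by_cases hnew : pvNew β k = true
    · rw [if_pos (hcond.mpr hnew), hnew, if_pos rfl, hshl]; ring
    · rw [if_neg (fun h => hnew (hcond.mp h))]
      have : pvNew β k = false := by simpa using hnew
      rw [this, if_neg Bool.false_ne_true]; ring

theorem pvStepB (m : Int) (β : Nat → Bool) :
    altStep (m * 2 ^ 25 + pvL β 25) = m * 2 ^ 25 + pvL (pvNew β) 25 := by
  unfold altStep
  rw [show (25:Int) = ((25:Nat):Int) by norm_num, PySem.List.pyRange_zero_natCast]
  rw [show ((m * 2 ^ 25 + pvL β 25) >>> (((25:Nat)):Int)) <<< (((25:Nat)):Int) = m * 2 ^ 25 by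
    have := pvHigh m β; norm_num at this ⊢; exact this]
  exact pvAltInv m β 25 (by omega)

theorem pvAgree (b : Int) : altStep b = simStep b := by
  have hdec : b = b / 2 ^ 25 * 2 ^ 25 + pvL (fun j => decide (b / 2 ^ j % 2 = 1)) 25 := by
    rw [pvDecomp]; ring
  conv_lhs => rw [hdec]
  conv_rhs => rw [hdec]
  rw [pvStepB, pvStepA]

-- ---- the orbit of the step map ----

def pvX (b : Int) : Nat → Int
  | 0 => b
  | n + 1 => simStep (pvX b n)

theorem pvXInv (b : Int) (n : Nat) :
    ∃ β : Nat → Bool, pvX b n = b / 2 ^ 25 * 2 ^ 25 + pvL β 25 := by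
  induction n with
  | zero =>
    exact ⟨fun j => decide (b / 2 ^ j % 2 = 1), by rw [pvX, pvDecomp]; ring⟩
  | succ n ih =>
    obtain ⟨β, hβ⟩ := ih
    exact ⟨pvNew β, by rw [pvX, hβ, pvStepA]⟩

theorem pvPigeon (b : Int) : ∃ u v, u < v ∧ v ≤ 2 ^ 25 ∧ pvX b u = pvX b v := by
  have hmaps : ∀ n ∈ Finset.range (2 ^ 25 + 1),
      (pvX b n - b / 2 ^ 25 * 2 ^ 25).toNat ∈ Finset.range (2 ^ 25) := by
    intro n _
    obtain ⟨β, hβ⟩ := pvXInv b n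
    have hb := pvL_bounds β 25
    rw [hβ]
    simp only [Finset.mem_range]
    omega
  obtain ⟨u, hu, v, hv, hne, heq⟩ :=
    Finset.exists_ne_map_eq_of_card_lt_of_maps_to
      (by simp : (Finset.range (2 ^ 25)).card < (Finset.range (2 ^ 25 + 1)).card) hmaps
  have hXeq : pvX b u = pvX b v := by
    obtain ⟨βu, hβu⟩ := pvXInv b u
    obtain ⟨βv, hβv⟩ := pvXInv b v
    have hbu := pvL_bounds βu 25
    have hbv := pvL_bounds βv 25
    rw [hβu, hβv] at heq ⊢
    omega
  simp only [Finset.mem_range] at hu hv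
  rcases Nat.lt_or_ge u v with h | h
  · exact ⟨u, v, h, by omega, hXeq⟩
  · exact ⟨v, u, by omega, by omega, hXeq.symm⟩

-- ---- A's loop returns the first repeated state ----

theorem pvMemRangeMap (b : Int) (m : Nat) (x : Int) :
    (x ∈ (List.range m).map (pvX b)) ↔ ∃ j, j < m ∧ pvX b j = x := by
  simp [List.mem_map, List.mem_range]

theorem pvALoop (b : Int) (K : Nat)
    (hQ : ∃ j, j < K ∧ pvX b j = pvX b K)
    (hmin : ∀ k, k < K → ¬ ∃ j, j < k ∧ pvX b j = pvX b k) :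
    ∀ fuel m, m ≤ K → K - m < fuel →
      simLoop fuel ((List.range m).map (pvX b)) (pvX b m) = pvX b K := by
  intro fuel
  induction fuel with
  | zero => intro m _ h; omega
  | succ fuel ih =>
    intro m hm hf
    rw [simLoop]
    by_cases hmem : pvX b m ∈ (List.range m).map (pvX b)
    · obtain ⟨j, hj, hje⟩ := (pvMemRangeMap b m _).mp hmem
      have : m = K := by
        by_contra hne
        exact hmin m (by omega) ⟨j, hj, hje⟩
      rw [if_pos hmem, this]
    · have hmK : m < K := by
        rcases Nat.lt_or_ge m K with h | h
        · exact h
        · have : m = K := by omega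
          exact absurd ((pvMemRangeMap b m _).mpr (this ▸ hQ)) hmem
      rw [if_neg hmem]
      have hadd : PySem.Set.add ((List.range m).map (pvX b)) (pvX b m)
          = (List.range (m + 1)).map (pvX b) := by
        rw [PySem.Set.add]
        rw [if_neg (by simpa using hmem)]
        rw [List.range_succ, List.map_append]
        rfl
      rw [hadd, show simStep (pvX b m) = pvX b (m + 1) from rfl]
      exact ih (m + 1) (by omega) (by omega)

-- ---- periodicity facts ----

theorem pvPeriodStep (b : Int) (J p : Nat) (hbase : pvX b (J + p) = pvX b J) :
    ∀ d, pvX b (J + d + p) = pvX b (J + d) := by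
  intro d
  induction d with
  | zero => simpa using hbase
  | succ d ih =>
    have h1 : J + (d + 1) + p = (J + d + p) + 1 := by omega
    have h2 : J + (d + 1) = (J + d) + 1 := by omega
    rw [h1, h2, pvX, pvX, ih]

theorem pvPeriodMul (b : Int) (J p : Nat) (hbase : pvX b (J + p) = pvX b J) :
    ∀ c m, J ≤ m → pvX b (m + c * p) = pvX b m := by
  intro c
  induction c with
  | zero => intro m _; simp
  | succ c ih =>
    intro m hm
    have h1 : m + (c + 1) * p = (m + c * p) + p := by ring
    have h2 : m + c * p = J + (m + c * p - J) := by omega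
    rw [h1, h2, pvPeriodStep b J p hbase, ← h2, ih m hm]

theorem pvReduce (b : Int) (J p : Nat) (hp : 0 < p) (hbase : pvX b (J + p) = pvX b J) :
    ∀ m, J ≤ m → pvX b m = pvX b (J + (m - J) % p) := by
  intro m hm
  have hdm : m = (J + (m - J) % p) + ((m - J) / p) * p := by
    have h1 := Nat.div_add_mod (m - J) p
    have h2 : ((m - J) / p) * p = p * ((m - J) / p) := Nat.mul_comm _ _
    omega
  have h := pvPeriodMul b J p hbase ((m - J) / p) (J + (m - J) % p) (by omega)
  rw [← hdm] at h
  exact h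

theorem pvDistinct (b : Int) (K : Nat)
    (hmin : ∀ k, k < K → ¬ ∃ j, j < k ∧ pvX b j = pvX b k) :
    ∀ u v, u < v → v < K → pvX b u ≠ pvX b v := by
  intro u v huv hvK heq
  exact hmin v hvK ⟨u, huv, heq⟩

theorem pvEarly (b : Int) (K J : Nat)
    (hJK : J < K) (hXJ : pvX b J = pvX b K)
    (hmin : ∀ k, k < K → ¬ ∃ j, j < k ∧ pvX b j = pvX b k) :
    ∀ a v, a < v → pvX b a = pvX b v → J ≤ a := by
  intro a v hav heq
  by_contra haJ
  push_neg at haJ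
  have hp : 0 < K - J := by omega
  have hbase : pvX b (J + (K - J)) = pvX b J := by
    rw [show J + (K - J) = K by omega, hXJ]
  rcases Nat.lt_or_ge v K with hvK | hvK
  · exact pvDistinct b K hmin a v hav hvK heq
  · have hred := pvReduce b J (K - J) hp hbase v (by omega)
    have hrlt : (v - J) % (K - J) < K - J := Nat.mod_lt _ hp
    have haneq : a ≠ J + (v - J) % (K - J) := by omega
    exact pvDistinct b K hmin a (J + (v - J) % (K - J)) (by omega) (by omega)
      (by rw [heq, hred])

theorem pvModEqIdx (b : Int) (K J : Nat)
    (hJK : J < K) (hXJ : pvX b J = pvX b K)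
    (hmin : ∀ k, k < K → ¬ ∃ j, j < k ∧ pvX b j = pvX b k) :
    ∀ u v, J ≤ u → J ≤ v → pvX b u = pvX b v →
      (u - J) % (K - J) = (v - J) % (K - J) := by
  intro u v hu hv heq
  have hp : 0 < K - J := by omega
  have hbase : pvX b (J + (K - J)) = pvX b J := by
    rw [show J + (K - J) = K by omega, hXJ]
  have hru := pvReduce b J (K - J) hp hbase u hu
  have hrv := pvReduce b J (K - J) hp hbase v hv
  have hlu : (u - J) % (K - J) < K - J := Nat.mod_lt _ hp
  have hlv : (v - J) % (K - J) < K - J := Nat.mod_lt _ hp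
  by_contra hne
  rcases Nat.lt_or_ge ((u - J) % (K - J)) ((v - J) % (K - J)) with h | h
  · exact pvDistinct b K hmin (J + (u - J) % (K - J)) (J + (v - J) % (K - J))
      (by omega) (by omega) (by rw [← hru, ← hrv]; exact heq)
  · exact pvDistinct b K hmin (J + (v - J) % (K - J)) (J + (u - J) % (K - J))
      (by omega) (by omega) (by rw [← hru, ← hrv]; exact heq.symm)

-- ---- Floyd's loops ----

theorem pvFloyd1 (b : Int) (T : Nat) (hT1 : 1 ≤ T)
    (hTmeet : pvX b T = pvX b (2 * T))
    (hTmin : ∀ t, 1 ≤ t → t < T → pvX b t ≠ pvX b (2 * t)) :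
    ∀ fuel t, 1 ≤ t → t ≤ T → T - t < fuel →
      floyd1 fuel (pvX b t) (pvX b (2 * t)) = pvX b T := by
  intro fuel
  induction fuel with
  | zero => intro t _ _ h; omega
  | succ fuel ih =>
    intro t ht1 htT hf
    rw [floyd1]
    by_cases heq : pvX b t = pvX b (2 * t)
    · have : t = T := by
        by_contra hne
        exact hTmin t ht1 (by omega) heq
      rw [if_pos heq, this]
    · have htT' : t < T := by
        rcases Nat.lt_or_ge t T with h | h
        · exact h
        · exact absurd (by rw [show t = T by omega]; exact hTmeet) heq
      rw [if_neg heq, pvAgree, pvAgree, pvAgree]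
      rw [show simStep (pvX b t) = pvX b (t + 1) from rfl,
        show simStep (simStep (pvX b (2 * t))) = pvX b (2 * t + 2) from rfl,
        show 2 * t + 2 = 2 * (t + 1) by ring]
      exact ih (t + 1) (by omega) (by omega) (by omega)

theorem pvFloyd2 (b : Int) (K J T : Nat)
    (hJK : J < K) (hXJ : pvX b J = pvX b K)
    (hmin : ∀ k, k < K → ¬ ∃ j, j < k ∧ pvX b j = pvX b k)
    (hT1 : 1 ≤ T) (hJT : pvX b J = pvX b (J + T)) :
    ∀ fuel i, i ≤ J → J - i < fuel →
      floyd2 fuel (pvX b i) (pvX b (i + T)) = pvX b J := by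
  intro fuel
  induction fuel with
  | zero => intro i _ h; omega
  | succ fuel ih =>
    intro i hiJ hf
    rw [floyd2]
    by_cases heq : pvX b i = pvX b (i + T)
    · have hJi : J ≤ i := pvEarly b K J hJK hXJ hmin i (i + T) (by omega) heq
      have : i = J := by omega
      rw [if_pos heq, this]
    · have hiJ' : i < J := by
        rcases Nat.lt_or_ge i J with h | h
        · exact h
        · exact absurd (by rw [show i = J by omega]; exact hJT) heq
      rw [if_neg heq, pvAgree, pvAgree]
      rw [show simStep (pvX b i) = pvX b (i + 1) from rfl,
        show simStep (pvX b (i + T)) = pvX b (i + T + 1) from rfl,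
        show i + T + 1 = (i + 1) + T by ring]
      exact ih (i + 1) (by omega) (by omega)

-- ---- putting it together ----

theorem pvFinal (b : Int) : simulate b = simulate_alt b := by
  -- first repeated index K
  obtain ⟨u, v, huv, hv25, hXuv⟩ := pvPigeon b
  have hQv : ∃ j, j < v ∧ pvX b j = pvX b v := ⟨u, huv, hXuv⟩
  have hexQ : ∃ k, ∃ j, j < k ∧ pvX b j = pvX b k := ⟨v, hQv⟩
  classical
  set K := Nat.find hexQ with hKdef
  have hQK : ∃ j, j < K ∧ pvX b j = pvX b K := Nat.find_spec hexQ
  have hKmin : ∀ k, k < K → ¬ ∃ j, j < k ∧ pvX b j = pvX b k := fun k hk =>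
    Nat.find_min hexQ hk
  have hK25 : K ≤ 2 ^ 25 := le_trans (Nat.find_le hQv) hv25
  obtain ⟨J, hJK, hXJ'⟩ := hQK
  have hXJ : pvX b J = pvX b K := hXJ'.symm ▸ hXJ'
  -- period p
  have hp : 0 < K - J := by omega
  have hbase : pvX b (J + (K - J)) = pvX b J := by
    rw [show J + (K - J) = K by omega, hXJ]
  -- a meeting time exists: t0 = (K-J) * (J / (K-J) + 1)
  have hmeet0 : ∃ t, 1 ≤ t ∧ t ≤ K ∧ pvX b t = pvX b (2 * t) := by
    refine ⟨(K - J) * (J / (K - J) + 1),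
      Nat.succ_le_of_lt (Nat.mul_pos hp (Nat.succ_pos _)), ?_, ?_⟩
    · have hd := Nat.div_add_mod J (K - J)
      have hlt : J % (K - J) < K - J := Nat.mod_lt _ hp
      have h3 : (K - J) * (J / (K - J) + 1) = (K - J) * (J / (K - J)) + (K - J) := by ring
      omega
    · have hge : J ≤ (K - J) * (J / (K - J) + 1) := by
        have hd := Nat.div_add_mod J (K - J)
        have hlt : J % (K - J) < K - J := Nat.mod_lt _ hp
        have h3 : (K - J) * (J / (K - J) + 1) = (K - J) * (J / (K - J)) + (K - J) := by ring
        omega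
      have := pvPeriodMul b J (K - J) hbase (J / (K - J) + 1)
        ((K - J) * (J / (K - J) + 1)) hge
      rw [show (K - J) * (J / (K - J) + 1) + (J / (K - J) + 1) * (K - J)
          = 2 * ((K - J) * (J / (K - J) + 1)) by ring] at this
      exact this.symm
  -- minimal meeting time T
  have hexT : ∃ t, 1 ≤ t ∧ pvX b t = pvX b (2 * t) := by
    obtain ⟨t, h1, _, h3⟩ := hmeet0
    exact ⟨t, h1, h3⟩
  set T := Nat.find hexT with hTdef
  obtain ⟨hT1, hTmeet⟩ := Nat.find_spec hexT
  have hTmin : ∀ t, 1 ≤ t → t < T → pvX b t ≠ pvX b (2 * t) := by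
    intro t h1 ht heq
    exact Nat.find_min hexT ht ⟨h1, heq⟩
  have hTK : T ≤ 2 ^ 25 := by
    obtain ⟨t, h1, h2, h3⟩ := hmeet0
    exact le_trans (Nat.find_le ⟨h1, h3⟩) (le_trans h2 hK25)
  -- J ≤ T and (K-J) ∣ T, hence X J = X (J + T)
  have hJT' : J ≤ T := pvEarly b K J hJK hXJ hKmin T (2 * T) (by omega) hTmeet
  have hTmod : T % (K - J) = 0 := by
    have h := pvModEqIdx b K J hJK hXJ hKmin T (2 * T) hJT' (by omega) hTmeet
    have h2 : (2 * T - J) = (T - J) + T := by omega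
    rw [h2] at h
    have hme : Nat.ModEq (K - J) ((T - J) + 0) ((T - J) + T) := by
      simpa [Nat.ModEq] using h
    have h0 : Nat.ModEq (K - J) 0 T := Nat.ModEq.add_left_cancel' _ hme
    simpa [Nat.ModEq] using h0.symm
  have hJTeq : pvX b J = pvX b (J + T) := by
    have : T = (T / (K - J)) * (K - J) := by
      have h1 := Nat.div_add_mod T (K - J)
      have h2 : (T / (K - J)) * (K - J) = (K - J) * (T / (K - J)) := Nat.mul_comm _ _
      omega
    rw [show J + T = J + (T / (K - J)) * (K - J) by omega]
    exact (pvPeriodMul b J (K - J) hbase (T / (K - J)) J (le_refl J)).symm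
  -- A's side
  have hA : simulate b = pvX b K := by
    have := pvALoop b K ⟨J, hJK, hXJ⟩ hKmin 33554434 0 (by omega) (by omega)
    simpa [simulate, PySem.Set.empty] using this
  -- B's side
  have hB : simulate_alt b = pvX b J := by
    have h1 : altStep b = pvX b 1 := by rw [pvAgree]; rfl
    have h2 : altStep (altStep b) = pvX b 2 := by rw [pvAgree, pvAgree]; rfl
    have hf1 := pvFloyd1 b T hT1 hTmeet hTmin 33554434 1 (le_refl 1) hT1 (by omega)
    have hf2 := pvFloyd2 b K J T hJK hXJ hKmin hT1 hJTeq 33554434 0 (by omega) (by omega)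
    rw [simulate_alt, h1, h2, show (2:Nat) = 2 * 1 by ring] at *
    rw [hf1]
    simpa using hf2
  rw [hA, hB, ← hXJ]

-- ===== VERDICT (by name: the statement is the Claim_ definition above) =====
theorem simulate_spec : Claim_equal_simulate := by
  intro biodiversity _
  exact pvFinal biodiversity
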